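-- pv_equiv track=rewrite | github.com/Dulneth210229/Auto-Forge-Agentic-System | services/agentic_service/agents/uiux_agent/parser.py | _extract_html_fragment
-- ===== SOURCE A (Python) =====
-- def _extract_html_fragment(text: str) -> str | None:
--     lower_text = text.lower()
--
--     candidates = ["<main", "<section", "<div", "<body"]
--
--     starts = [
--         lower_text.find(candidate)
--         for candidate in candidates
--         if lower_text.find(candidate) != -1
--     ]
--
--     if not starts:
--         return None
--
--     return text[min(starts):].strip()
-- ===== SOURCE B (Python) =====
-- def _extract_html_fragment(text: str) -> str | None:
--     lower_text = text.lower()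
--     tags = ("<main", "<section", "<div", "<body")
--     for i in range(len(text)):
--         if lower_text.startswith(tags, i):
--             return text[i:].strip()
--     return None
-- ===== Notes on version B (the rewrite author's own statement) =====
-- stated objective: alternative
-- what changed: Replaces the four independent substring searches plus min() over collected positions with a single left-to-right scan that returns at the first position where any candidate tag starts.
import Mathlib
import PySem

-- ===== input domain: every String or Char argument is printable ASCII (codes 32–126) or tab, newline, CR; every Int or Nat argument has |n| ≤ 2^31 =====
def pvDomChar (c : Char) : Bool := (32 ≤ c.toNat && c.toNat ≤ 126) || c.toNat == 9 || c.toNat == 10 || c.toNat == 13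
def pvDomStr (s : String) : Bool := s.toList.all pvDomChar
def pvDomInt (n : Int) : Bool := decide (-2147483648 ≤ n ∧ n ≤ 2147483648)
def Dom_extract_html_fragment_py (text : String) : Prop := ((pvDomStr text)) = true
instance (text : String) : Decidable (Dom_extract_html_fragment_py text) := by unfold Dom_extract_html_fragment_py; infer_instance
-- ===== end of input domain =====

-- B replaces four independent substring searches + min() over collected positions
-- by a single left-to-right scan returning at the first position where any tag starts (alternative; same cost).


-- ===== PORT A =====
def pvCandidatesA : List (List Char) :=
  ["<main".toList, "<section".toList, "<div".toList, "<body".toList]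

def extract_html_fragment_py (text : String) : Option String :=
  let lower_text := PySem.Chars.lower text.toList
  let starts := pvCandidatesA.filterMap (fun c =>
    if PySem.Chars.find lower_text c ≠ -1 then some (PySem.Chars.find lower_text c) else none)
  match PySem.List.min? starts (fun x => x) with
  | none => none
  | some m => some (String.ofList (PySem.Chars.strip (PySem.List.slice text.toList (some m) none)))

-- ===== PORT B =====
def pvTagsB : List (List Char) :=
  ["<main".toList, "<section".toList, "<div".toList, "<body".toList]

def pvScanB : List Char → List Char → Option (List Char)
  | _, [] => none
  | o, c :: cs =>
    if pvTagsB.any (fun t => PySem.Chars.startswith (c :: cs) t) then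
      some (PySem.Chars.strip o)
    else pvScanB o.tail cs

def extract_html_fragment_py_alt (text : String) : Option String :=
  (pvScanB text.toList (PySem.Chars.lower text.toList)).map String.ofList

-- ===== PRECONDITION & SPEC =====
def Spec_extract_html_fragment_py (text : String) (out : Option String) : Prop := out = extract_html_fragment_py_alt text
instance (text : String) (out : Option String) : Decidable (Spec_extract_html_fragment_py text out) := by unfold Spec_extract_html_fragment_py; infer_instance

-- ===== CLAIM (what is proved, stated in full; the proofs are below) =====
def Claim_equal_extract_html_fragment_py : Prop := ∀ (text : String), Dom_extract_html_fragment_py text → Spec_extract_html_fragment_py text (extract_html_fragment_py text)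

-- ===== LEMMAS AND PROOFS =====
theorem pvTags_ne_nil : ∀ t ∈ pvTagsB, t ≠ [] := by decide

-- B's scan returns none when no tag occurs anywhere in l
theorem pvScanB_none (l : List Char) :
    (∀ t ∈ pvTagsB, ¬ t <:+: l) → ∀ o, pvScanB o l = none := by
  induction l with
  | nil => intro _ o; rfl
  | cons c cs ih =>
    intro h o
    have hany : pvTagsB.any (fun t => PySem.Chars.startswith (c :: cs) t) = false := by
      simp only [List.any_eq_false]
      intro t ht hsw
      exact h t ht ((PySem.Chars.startswith_iff _ _).mp hsw).isInfix
    simp only [pvScanB, hany, Bool.false_eq_true, if_false]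
    exact ih (fun t ht hin => h t ht (hin.trans (List.suffix_cons c cs).isInfix)) o.tail

-- B's scan returns strip (o.drop m) at the least hit position m
theorem pvScanB_found (l : List Char) :
    ∀ (o : List Char) (m : Nat),
      (∃ t ∈ pvTagsB, t <+: l.drop m) →
      (∀ i < m, ∀ t ∈ pvTagsB, ¬ t <+: l.drop i) →
      pvScanB o l = some (PySem.Chars.strip (o.drop m)) := by
  induction l with
  | nil =>
    intro o m ⟨t, ht, hpre⟩ _
    exact absurd (List.prefix_nil.mp (by simpa using hpre)) (pvTags_ne_nil t ht)
  | cons c cs ih =>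
    intro o m hex hmin
    cases m with
    | zero =>
      obtain ⟨t, ht, hpre⟩ := hex
      have hany : pvTagsB.any (fun t => PySem.Chars.startswith (c :: cs) t) = true := by
        simp only [List.any_eq_true]
        exact ⟨t, ht, (PySem.Chars.startswith_iff _ _).mpr (by simpa using hpre)⟩
      simp [pvScanB, hany]
    | succ m' =>
      have hany : pvTagsB.any (fun t => PySem.Chars.startswith (c :: cs) t) = false := by
        simp only [List.any_eq_false]
        intro t ht hsw
        have := hmin 0 (Nat.succ_pos m') t ht
        simp only [List.drop_zero] at this
        exact this ((PySem.Chars.startswith_iff _ _).mp hsw)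
      simp only [pvScanB, hany, Bool.false_eq_true, if_false]
      have := ih o.tail m' (by simpa using hex)
        (fun i hi t ht => by
          have := hmin (i + 1) (by omega) t ht
          simpa using this)
      have hdrop : o.tail.drop m' = o.drop (m' + 1) := by
        rw [← List.drop_one, List.drop_drop, Nat.add_comm]
      rw [this, hdrop]

-- the candidate lists of the two ports coincide
theorem cands_eq : pvCandidatesA = pvTagsB := rfl

theorem extract_html_fragment_py_eq (text : String) :
    extract_html_fragment_py text = extract_html_fragment_py_alt text := by
  simp only [extract_html_fragment_py, extract_html_fragment_py_alt]
  set lt := PySem.Chars.lower text.toList with hlt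
  set starts := pvCandidatesA.filterMap (fun c =>
    if PySem.Chars.find lt c ≠ -1 then some (PySem.Chars.find lt c) else none) with hstarts
  have hmem : ∀ x ∈ starts, ∃ c ∈ pvTagsB, PySem.Chars.find lt c ≠ -1 ∧ x = PySem.Chars.find lt c := by
    intro x hx
    rw [hstarts, List.mem_filterMap] at hx
    obtain ⟨c, hc, hcx⟩ := hx
    rw [← cands_eq]
    refine ⟨c, hc, ?_⟩
    by_cases h : PySem.Chars.find lt c ≠ -1
    · simp [h] at hcx; exact ⟨h, hcx.symm⟩
    · simp [h] at hcx
  have hmem' : ∀ c ∈ pvTagsB, PySem.Chars.find lt c ≠ -1 → PySem.Chars.find lt c ∈ starts := by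
    intro c hc h
    rw [hstarts, List.mem_filterMap]
    exact ⟨c, by rw [cands_eq]; exact hc, by simp [h]⟩
  cases hmin : PySem.List.min? starts (fun x => x) with
  | none =>
    have hse : starts = [] := (PySem.List.min?_eq_none_iff _ _).mp hmin
    have hnone : ∀ t ∈ pvTagsB, ¬ t <:+: lt := by
      intro t ht hin
      have hf : PySem.Chars.find lt t ≠ -1 := (PySem.Chars.find_ne_neg_one_iff _ _).mpr hin
      have := hmem' t ht hf
      simp [hse] at this
    rw [pvScanB_none lt hnone text.toList]
    rfl
  | some m =>
    obtain ⟨c, hc, hcf, hmc⟩ := hmem m (PySem.List.min?_mem hmin)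
    have hm0 : 0 ≤ m := by
      have h1 := PySem.Chars.neg_one_le_find lt c
      omega
    have hspec := PySem.Chars.find_spec (s := lt) (sub := c) (by omega)
    have hex : ∃ t ∈ pvTagsB, t <+: lt.drop m.toNat := ⟨c, hc, by rw [hmc]; exact hspec.1⟩
    have hminp : ∀ i < m.toNat, ∀ t ∈ pvTagsB, ¬ t <+: lt.drop i := by
      intro i hi t ht hpre
      by_cases hf : PySem.Chars.find lt t = -1
      · have : ¬ t <:+: lt := (PySem.Chars.find_eq_neg_one_iff _ _).mp hf
        exact this (hpre.isInfix.trans (List.drop_suffix i lt).isInfix)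
      · have hle : m ≤ PySem.Chars.find lt t := PySem.List.min?_isMin hmin _ (hmem' t ht hf)
        have hfs := PySem.Chars.find_spec (s := lt) (sub := t) (by omega)
        exact hfs.2 i (by omega) hpre
    rw [pvScanB_found lt text.toList m.toNat hex hminp]
    simp only [Option.map_some]
    rw [PySem.List.slice_from text.toList hm0]

-- ===== VERDICT (by name: the statement is the Claim_ definition above) =====
theorem extract_html_fragment_py_spec : Claim_equal_extract_html_fragment_py := by
  intro text _
  unfold Spec_extract_html_fragment_py
  exact extract_html_fragment_py_eq text
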